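-- pv_equiv track=rewrite | github.com/lshwa/SLR-Compiler | parser.py | find_production_number
-- ===== SOURCE A (Python) =====
-- from typing import List, Tuple, Union
--
-- cfg = {
--     -1: "S' → Program",
--     0: "Program → DeclList",
--     1: "DeclList → Decl DeclList",
--     2: "DeclList → ε",
--     3: "Decl → VarDecl",
--     4: "Decl → FuncDecl",
--     5: "VarDecl → type id ;",
--     6: "VarDecl → type id = Expr ;",
--     7: "FuncDecl → type id ( ParamList ) Block",
--     8: "ParamList → Param , ParamList",
--     9: "ParamList → Param",
--     10: "ParamList → ε",
--     11: "Param → type id",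
--     12: "Block → { StmtList }",
--     13: "StmtList → Stmt StmtList",
--     14: "StmtList → ε",
--     15: "Stmt → IfStmt",
--     16: "Stmt → LoopStmt",
--     17: "Stmt → ReturnStmt",
--     18: "Stmt → ExprStmt",
--     19: "Stmt → VarDecl",   # 새로 추가된 CFG 문법
--     20: "Stmt → Block",
--     21: "IfStmt → if ( Expr ) Stmt ElsePart",
--     22: "ElsePart → else Stmt",
--     23: "ElsePart → ε",
--     24: "LoopStmt → while ( Expr ) Stmt",
--     25: "LoopStmt → for ( Expr ; Expr ; Expr ) Stmt",
--     26: "ReturnStmt → return Expr ;",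
--     27: "ExprStmt → id = Expr ;",  # 수정된 CFG 문법
--     28: "Expr → EqualityExpr",
--     29: "EqualityExpr → EqualityExpr == AddExpr",
--     30: "EqualityExpr → AddExpr",
--     31: "AddExpr → AddExpr + MulExpr",
--     32: "AddExpr → MulExpr",
--     33: "MulExpr → MulExpr * UnaryExpr",
--     34: "MulExpr → UnaryExpr",
--     35: "UnaryExpr → - UnaryExpr",
--     36: "UnaryExpr → id ( ArgList )",
--     37: "UnaryExpr → id",
--     38: "UnaryExpr → num",
--     39: "UnaryExpr → ( Expr )",
--     40: "ArgList → Expr , ArgList",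
--     41: "ArgList → Expr",
--     42: "ArgList → ε"
-- }
--
-- def find_production_number(lhs: str, rhs: List[str]) -> int:
--
--     for num, rule in cfg.items():
--         if "→" not in rule:
--             continue
--
--         # production rule을 좌변과 우변으로 나눔
--         rule_lhs, rule_rhs = rule.split("→")
--         rule_lhs = rule_lhs.strip()
--         rule_rhs = rule_rhs.strip()
--
--         if rule_rhs == 'ε':
--             rule_rhs_symbols = []
--         else:
--             rule_rhs_symbols = rule_rhs.split()
--
--         # lhs와 rhs가 일치하는 production 찾아서 번호 반환
--         if rule_lhs == lhs and rule_rhs_symbols == rhs: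
--             return num
--
--     # 에러 (일치하는 production이 없다.)
--     return -1
-- ===== SOURCE B (Python) =====
-- from typing import List
--
-- # The grammar as structured data: (lhs, rhs-symbol-tuple) -> production number.
-- # No string parsing anywhere: the table IS the reverse index.
-- PRODUCTIONS = {
--     ("S'", ("Program",)): -1,
--     ("Program", ("DeclList",)): 0,
--     ("DeclList", ("Decl", "DeclList")): 1,
--     ("DeclList", ()): 2,
--     ("Decl", ("VarDecl",)): 3,
--     ("Decl", ("FuncDecl",)): 4,
--     ("VarDecl", ("type", "id", ";")): 5,
--     ("VarDecl", ("type", "id", "=", "Expr", ";")): 6,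
--     ("FuncDecl", ("type", "id", "(", "ParamList", ")", "Block")): 7,
--     ("ParamList", ("Param", ",", "ParamList")): 8,
--     ("ParamList", ("Param",)): 9,
--     ("ParamList", ()): 10,
--     ("Param", ("type", "id")): 11,
--     ("Block", ("{", "StmtList", "}")): 12,
--     ("StmtList", ("Stmt", "StmtList")): 13,
--     ("StmtList", ()): 14,
--     ("Stmt", ("IfStmt",)): 15,
--     ("Stmt", ("LoopStmt",)): 16,
--     ("Stmt", ("ReturnStmt",)): 17,
--     ("Stmt", ("ExprStmt",)): 18,
--     ("Stmt", ("VarDecl",)): 19,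
--     ("Stmt", ("Block",)): 20,
--     ("IfStmt", ("if", "(", "Expr", ")", "Stmt", "ElsePart")): 21,
--     ("ElsePart", ("else", "Stmt")): 22,
--     ("ElsePart", ()): 23,
--     ("LoopStmt", ("while", "(", "Expr", ")", "Stmt")): 24,
--     ("LoopStmt", ("for", "(", "Expr", ";", "Expr", ";", "Expr", ")", "Stmt")): 25,
--     ("ReturnStmt", ("return", "Expr", ";")): 26,
--     ("ExprStmt", ("id", "=", "Expr", ";")): 27,
--     ("Expr", ("EqualityExpr",)): 28,
--     ("EqualityExpr", ("EqualityExpr", "==", "AddExpr")): 29,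
--     ("EqualityExpr", ("AddExpr",)): 30,
--     ("AddExpr", ("AddExpr", "+", "MulExpr")): 31,
--     ("AddExpr", ("MulExpr",)): 32,
--     ("MulExpr", ("MulExpr", "*", "UnaryExpr")): 33,
--     ("MulExpr", ("UnaryExpr",)): 34,
--     ("UnaryExpr", ("-", "UnaryExpr")): 35,
--     ("UnaryExpr", ("id", "(", "ArgList", ")")): 36,
--     ("UnaryExpr", ("id",)): 37,
--     ("UnaryExpr", ("num",)): 38,
--     ("UnaryExpr", ("(", "Expr", ")")): 39,
--     ("ArgList", ("Expr", ",", "ArgList")): 40,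
--     ("ArgList", ("Expr",)): 41,
--     ("ArgList", ()): 42,
-- }
--
-- def find_production_number(lhs: str, rhs: List[str]) -> int:
--     return PRODUCTIONS.get((lhs, tuple(rhs)), -1)
-- ===== Notes on version B (the rewrite author's own statement) =====
-- stated objective: alternative
-- what changed: B replaces A's per-call scan that re-splits and strips every cfg rule string with a hardcoded structured reverse-lookup dict (lhs, tuple(rhs)) -> number, so the function is a single dict .get with default -1 and no string parsing at all.
import Mathlib
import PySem

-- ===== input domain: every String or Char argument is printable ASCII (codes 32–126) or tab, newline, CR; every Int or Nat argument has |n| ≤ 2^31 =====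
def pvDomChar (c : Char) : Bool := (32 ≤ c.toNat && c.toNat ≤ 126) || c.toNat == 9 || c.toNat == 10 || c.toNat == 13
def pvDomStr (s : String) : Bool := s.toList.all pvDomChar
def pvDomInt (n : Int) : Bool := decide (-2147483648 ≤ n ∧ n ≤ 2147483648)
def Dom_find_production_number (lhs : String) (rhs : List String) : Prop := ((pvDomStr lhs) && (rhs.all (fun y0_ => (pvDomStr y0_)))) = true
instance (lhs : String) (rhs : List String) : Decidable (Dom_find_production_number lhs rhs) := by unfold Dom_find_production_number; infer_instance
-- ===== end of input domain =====

-- B replaces A's per-call scan-and-parse of the grammar rule strings with a hardcoded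
-- structured reverse-lookup table (lhs, rhs) -> number; the function is one dict lookup
-- with default -1 and no string parsing (objective: alternative).

-- ===== PORT A =====
-- the module-level constant cfg (dict int -> str, insertion order)
def pvCfg : List (Int × String) := [
  (-1, "S' → Program"),
  (0, "Program → DeclList"),
  (1, "DeclList → Decl DeclList"),
  (2, "DeclList → ε"),
  (3, "Decl → VarDecl"),
  (4, "Decl → FuncDecl"),
  (5, "VarDecl → type id ;"),
  (6, "VarDecl → type id = Expr ;"),
  (7, "FuncDecl → type id ( ParamList ) Block"),
  (8, "ParamList → Param , ParamList"),
  (9, "ParamList → Param"),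
  (10, "ParamList → ε"),
  (11, "Param → type id"),
  (12, "Block → { StmtList }"),
  (13, "StmtList → Stmt StmtList"),
  (14, "StmtList → ε"),
  (15, "Stmt → IfStmt"),
  (16, "Stmt → LoopStmt"),
  (17, "Stmt → ReturnStmt"),
  (18, "Stmt → ExprStmt"),
  (19, "Stmt → VarDecl"),
  (20, "Stmt → Block"),
  (21, "IfStmt → if ( Expr ) Stmt ElsePart"),
  (22, "ElsePart → else Stmt"),
  (23, "ElsePart → ε"),
  (24, "LoopStmt → while ( Expr ) Stmt"),
  (25, "LoopStmt → for ( Expr ; Expr ; Expr ) Stmt"),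
  (26, "ReturnStmt → return Expr ;"),
  (27, "ExprStmt → id = Expr ;"),
  (28, "Expr → EqualityExpr"),
  (29, "EqualityExpr → EqualityExpr == AddExpr"),
  (30, "EqualityExpr → AddExpr"),
  (31, "AddExpr → AddExpr + MulExpr"),
  (32, "AddExpr → MulExpr"),
  (33, "MulExpr → MulExpr * UnaryExpr"),
  (34, "MulExpr → UnaryExpr"),
  (35, "UnaryExpr → - UnaryExpr"),
  (36, "UnaryExpr → id ( ArgList )"),
  (37, "UnaryExpr → id"),
  (38, "UnaryExpr → num"),
  (39, "UnaryExpr → ( Expr )"),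
  (40, "ArgList → Expr , ArgList"),
  (41, "ArgList → Expr"),
  (42, "ArgList → ε")]

-- "rule_lhs, rule_rhs = rule.split('→')" ported by hand with getD 0/1: exact
-- whenever the split has exactly two parts, which holds for every rule in cfg.
def pvParseRule (rule : String) : String × List String :=
  let parts := (PySem.Str.split? rule "→").getD []
  let rule_lhs := PySem.Str.strip (parts.getD 0 "")
  let rule_rhs := PySem.Str.strip (parts.getD 1 "")
  let syms := if rule_rhs = "ε" then ([] : List String) else PySem.Str.split₀ rule_rhs
  (rule_lhs, syms)

-- the for-loop of A: scan cfg.items() in order, parse each rule, return on first match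
def pvALoop (lhs : String) (rhs : List String) : List (Int × String) → Int
  | [] => -1
  | (num, rule) :: rest =>
    if PySem.Str.isIn "→" rule = false then pvALoop lhs rhs rest
    else
      let p := pvParseRule rule
      if p.1 = lhs ∧ p.2 = rhs then num else pvALoop lhs rhs rest

def find_production_number (lhs : String) (rhs : List String) : Int :=
  pvALoop lhs rhs pvCfg

-- ===== PORT B =====
-- Source B's module-level dict literal PRODUCTIONS: (lhs, rhs symbols) -> production number
def pvProdTable : List ((String × List String) × Int) := [
  (("S'", ["Program"]), -1),
  (("Program", ["DeclList"]), 0),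
  (("DeclList", ["Decl", "DeclList"]), 1),
  (("DeclList", []), 2),
  (("Decl", ["VarDecl"]), 3),
  (("Decl", ["FuncDecl"]), 4),
  (("VarDecl", ["type", "id", ";"]), 5),
  (("VarDecl", ["type", "id", "=", "Expr", ";"]), 6),
  (("FuncDecl", ["type", "id", "(", "ParamList", ")", "Block"]), 7),
  (("ParamList", ["Param", ",", "ParamList"]), 8),
  (("ParamList", ["Param"]), 9),
  (("ParamList", []), 10),
  (("Param", ["type", "id"]), 11),
  (("Block", ["{", "StmtList", "}"]), 12),
  (("StmtList", ["Stmt", "StmtList"]), 13),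
  (("StmtList", []), 14),
  (("Stmt", ["IfStmt"]), 15),
  (("Stmt", ["LoopStmt"]), 16),
  (("Stmt", ["ReturnStmt"]), 17),
  (("Stmt", ["ExprStmt"]), 18),
  (("Stmt", ["VarDecl"]), 19),
  (("Stmt", ["Block"]), 20),
  (("IfStmt", ["if", "(", "Expr", ")", "Stmt", "ElsePart"]), 21),
  (("ElsePart", ["else", "Stmt"]), 22),
  (("ElsePart", []), 23),
  (("LoopStmt", ["while", "(", "Expr", ")", "Stmt"]), 24),
  (("LoopStmt", ["for", "(", "Expr", ";", "Expr", ";", "Expr", ")", "Stmt"]), 25),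
  (("ReturnStmt", ["return", "Expr", ";"]), 26),
  (("ExprStmt", ["id", "=", "Expr", ";"]), 27),
  (("Expr", ["EqualityExpr"]), 28),
  (("EqualityExpr", ["EqualityExpr", "==", "AddExpr"]), 29),
  (("EqualityExpr", ["AddExpr"]), 30),
  (("AddExpr", ["AddExpr", "+", "MulExpr"]), 31),
  (("AddExpr", ["MulExpr"]), 32),
  (("MulExpr", ["MulExpr", "*", "UnaryExpr"]), 33),
  (("MulExpr", ["UnaryExpr"]), 34),
  (("UnaryExpr", ["-", "UnaryExpr"]), 35),
  (("UnaryExpr", ["id", "(", "ArgList", ")"]), 36),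
  (("UnaryExpr", ["id"]), 37),
  (("UnaryExpr", ["num"]), 38),
  (("UnaryExpr", ["(", "Expr", ")"]), 39),
  (("ArgList", ["Expr", ",", "ArgList"]), 40),
  (("ArgList", ["Expr"]), 41),
  (("ArgList", []), 42)]

def pvProductions : PySem.Dict (String × List String) Int :=
  PySem.Dict.ofList pvProdTable

def find_production_number_alt (lhs : String) (rhs : List String) : Int :=
  pvProductions.getD (lhs, rhs) (-1)

-- ===== PRECONDITION & SPEC =====
def Spec_find_production_number (lhs : String) (rhs : List String) (out : Int) : Prop := out = find_production_number_alt lhs rhs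
instance (lhs : String) (rhs : List String) (out : Int) : Decidable (Spec_find_production_number lhs rhs out) := by unfold Spec_find_production_number; infer_instance

-- ===== CLAIM (what is proved, stated in full; the proofs are below) =====
def Claim_equal_find_production_number : Prop := ∀ (lhs : String) (rhs : List String), Dom_find_production_number lhs rhs → Spec_find_production_number lhs rhs (find_production_number lhs rhs)

-- ===== LEMMAS AND PROOFS =====

-- first-match lookup in a key/number table
def pvLookup (lhs : String) (rhs : List String) : List ((String × List String) × Int) → Int
  | [] => -1
  | (k, n) :: rest => if k.1 = lhs ∧ k.2 = rhs then n else pvLookup lhs rhs rest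

-- the parsed table A effectively scans: (key, num) pairs in cfg order, arrow-less entries skipped
def pvParsed (items : List (Int × String)) : List ((String × List String) × Int) :=
  items.filterMap (fun p =>
    if PySem.Str.isIn "→" p.2 = false then none else some (pvParseRule p.2, p.1))

theorem pvALoop_eq_lookup (lhs : String) (rhs : List String) (items : List (Int × String)) :
    pvALoop lhs rhs items = pvLookup lhs rhs (pvParsed items) := by
  induction items with
  | nil => rfl
  | cons p rest ih =>
    obtain ⟨num, rule⟩ := p
    simp only [pvALoop, pvParsed, List.filterMap_cons]
    by_cases h : PySem.Str.isIn "→" rule = false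
    · rw [if_pos h, if_pos h]
      simpa [pvParsed] using ih
    · rw [if_neg h, if_neg h]
      simp only [pvLookup]
      split
      · rfl
      · simpa [pvParsed] using ih

-- parsing cfg yields exactly B's hardcoded table (kernel evaluation)
set_option maxHeartbeats 2000000 in
theorem parsed_cfg_eq_table : pvParsed pvCfg = pvProdTable := by rfl

-- on a literal Dict, getD answers first-match lookup regardless of key duplication
theorem getD_mk_eq_lookup (lhs : String) (rhs : List String)
    (L : List ((String × List String) × Int)) :
    (PySem.Dict.mk L).getD (lhs, rhs) (-1) = pvLookup lhs rhs L := by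
  induction L with
  | nil => rfl
  | cons q rest ih =>
    obtain ⟨k, n⟩ := q
    rw [PySem.Dict.getD_eq_get?_getD, PySem.Dict.get?_mk_cons]
    by_cases hk : k.1 = lhs ∧ k.2 = rhs
    · have : k = (lhs, rhs) := by obtain ⟨h1, h2⟩ := hk; cases k; simp_all
      simp [pvLookup, this]
    · have : (k == (lhs, rhs)) = false := by
        cases k; simp_all [Prod.ext_iff]
      rw [this]
      simpa [pvLookup, hk, PySem.Dict.getD_eq_get?_getD] using ih

-- the dict built from the literal table has exactly that items list (keys are distinct)
set_option maxHeartbeats 2000000 in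
set_option maxRecDepth 10000 in
theorem productions_items : pvProductions = PySem.Dict.mk pvProdTable := by rfl

-- ===== VERDICT (by name: the statement is the Claim_ definition above) =====
theorem find_production_number_spec : Claim_equal_find_production_number := by
  intro lhs rhs _
  unfold Spec_find_production_number find_production_number find_production_number_alt
  rw [pvALoop_eq_lookup, parsed_cfg_eq_table, productions_items, getD_mk_eq_lookup]
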